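-- pv_equiv track=rewrite | github.com/arcasilesgroup/ai-engineering | src/ai_engineering/templates/.ai-engineering/scripts/hooks/_lib/instincts.py | _group_by_session
-- ===== SOURCE A (Python) =====
-- from collections import Counter, defaultdict
-- from typing import Any
--
-- def _group_by_session(
--     observations: list[dict[str, Any]],
-- ) -> dict[str, list[dict[str, Any]]]:
--     grouped: dict[str, list[dict[str, Any]]] = defaultdict(list)
--     for entry in observations:
--         grouped[entry.get("sessionId") or "default"].append(entry)
--     for entries in grouped.values():
--         entries.sort(key=lambda item: item.get("timestamp", ""))
--     return grouped
-- ===== SOURCE B (Python) =====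
-- def _group_by_session(observations):
--     def key(entry):
--         return entry.get("sessionId") or "default"
--     # register each session key once, in first-appearance order, with an empty bucket
--     grouped = {k: [] for k in dict.fromkeys(key(e) for e in observations)}
--     # one global stable sort by timestamp; each bucket then fills up already ordered
--     for entry in sorted(observations, key=lambda item: item.get("timestamp", "")):
--         grouped[key(entry)].append(entry)
--     return grouped
-- ===== Notes on version B (the rewrite author's own statement) =====
-- stated objective: alternative
-- what changed: B replaces A's group-then-sort-each-bucket with one global stable sort by timestamp followed by a single grouping pass into pre-registered buckets (stability makes each bucket emerge already ordered, with A's tie order and key order).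
import Mathlib
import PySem

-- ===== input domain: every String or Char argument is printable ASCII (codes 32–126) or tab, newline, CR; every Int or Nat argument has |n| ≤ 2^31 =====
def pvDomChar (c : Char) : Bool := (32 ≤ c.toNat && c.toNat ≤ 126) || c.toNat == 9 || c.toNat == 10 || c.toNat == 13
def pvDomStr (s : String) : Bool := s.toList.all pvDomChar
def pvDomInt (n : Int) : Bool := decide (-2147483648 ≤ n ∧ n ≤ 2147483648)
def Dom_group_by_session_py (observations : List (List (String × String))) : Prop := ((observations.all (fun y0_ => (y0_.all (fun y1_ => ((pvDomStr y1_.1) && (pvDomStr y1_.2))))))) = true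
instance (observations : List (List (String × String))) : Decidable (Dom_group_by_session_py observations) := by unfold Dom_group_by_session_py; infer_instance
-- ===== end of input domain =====

-- B replaces the per-bucket sorts by one global stable sort over all observations,
-- followed by a single grouping pass (alternative decomposition; same results, same cost class).
-- ===== PORT A =====
-- shared key helpers: both Pythons compute entry.get("sessionId") or "default"
-- and item.get("timestamp", "") in exactly these words
def pvSessionKey (e : List (String × String)) : String :=
  match (PySem.Dict.mk e).get? "sessionId" with
  | none => "default"
  | some s => if s == "" then "default" else s

def pvTsKey (e : List (String × String)) : String :=
  (PySem.Dict.mk e).getD "timestamp" ""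

def group_by_session_py (observations : List (List (String × String))) : List (String × List (List (String × String))) :=
  -- grouped = defaultdict(list); for entry: grouped[key].append(entry)
  let grouped := observations.foldl
    (fun d e => d.modify (pvSessionKey e) [] (fun l => l ++ [e])) PySem.Dict.empty
  -- for entries in grouped.values(): entries.sort(key=...); return grouped
  grouped.items.map (fun p => (p.1, PySem.List.sorted p.2 pvTsKey false))

-- ===== PORT B =====
def group_by_session_py_alt (observations : List (List (String × String))) : List (String × List (List (String × String))) :=
  -- grouped = {k: [] for k in dict.fromkeys(key(e) for e in observations)}
  let grouped := PySem.Dict.ofList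
    ((PySem.List.dedup (observations.map pvSessionKey)).map
      (fun k => (k, ([] : List (List (String × String))))))
  -- for entry in sorted(observations, key=timestamp): grouped[key(entry)].append(entry)
  let filled := (PySem.List.sorted observations pvTsKey false).foldl
    (fun d e => d.modify (pvSessionKey e) [] (fun l => l ++ [e])) grouped
  filled.items

-- ===== PRECONDITION & SPEC =====
def Spec_group_by_session_py (observations : List (List (String × String))) (out : List (String × List (List (String × String)))) : Prop := out = group_by_session_py_alt observations
instance (observations : List (List (String × String))) (out : List (String × List (List (String × String)))) : Decidable (Spec_group_by_session_py observations out) := by unfold Spec_group_by_session_py; infer_instance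

-- ===== CLAIM (what is proved, stated in full; the proofs are below) =====
def Claim_equal_group_by_session_py : Prop := ∀ (observations : List (List (String × String))), Dom_group_by_session_py observations → Spec_group_by_session_py observations (group_by_session_py observations)

-- ===== LEMMAS AND PROOFS =====

-- the append-into-bucket loop both ports share
theorem getD_groupFold (l : List (List (String × String)))
    (d : PySem.Dict String (List (List (String × String)))) (k : String) :
    (l.foldl (fun d e => d.modify (pvSessionKey e) [] (fun l => l ++ [e])) d).getD k []
      = d.getD k [] ++ l.filter (fun e => pvSessionKey e == k) := by
  induction l generalizing d with
  | nil => simp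
  | cons e l ih =>
      simp only [List.foldl_cons, ih, List.filter_cons]
      rw [PySem.Dict.getD_modify]
      by_cases h : k = pvSessionKey e
      · simp [h, List.append_assoc]
      · simp [h, Ne.symm h]

theorem keys_groupFold (l : List (List (String × String)))
    (d : PySem.Dict String (List (List (String × String)))) :
    (l.foldl (fun d e => d.modify (pvSessionKey e) [] (fun l => l ++ [e])) d).keys
      = (l.map pvSessionKey).foldl PySem.Set.add d.keys := by
  induction l generalizing d with
  | nil => rfl
  | cons e l ih =>
      simp only [List.foldl_cons, List.map_cons, ih]
      congr 1
      rw [PySem.Dict.keys_modify]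
      by_cases h : (d.contains (pvSessionKey e)) = true
      · rw [PySem.Dict.keys_insert_of_contains _ _ h]
        have hm : pvSessionKey e ∈ d.keys := (PySem.Dict.contains_iff_mem_keys d _).mp h
        simp [PySem.Set.add, PySem.Set.contains, hm]
      · rw [PySem.Dict.keys_insert_of_not_contains _ _ (by simpa using h)]
        have hm : pvSessionKey e ∉ d.keys :=
          fun hm => h ((PySem.Dict.contains_iff_mem_keys d _).mpr hm)
        simp [PySem.Set.add, PySem.Set.contains, hm]

theorem foldl_add_of_mem (xs : List String) (s : PySem.Set String)
    (h : ∀ x ∈ xs, x ∈ s) : xs.foldl PySem.Set.add s = s := by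
  induction xs with
  | nil => rfl
  | cons x xs ih =>
      have hx : PySem.Set.contains s x = true := by
        simpa [PySem.Set.contains] using h x (by simp)
      simp only [List.foldl_cons, PySem.Set.add, hx, if_pos]
      exact ih (fun y hy => h y (by simp [hy]))

-- the {k: [] for k in ks} comprehension
theorem keys_initFold (ks : List String)
    (d : PySem.Dict String (List (List (String × String))))
    (hnd : ks.Nodup) (hfresh : ∀ k ∈ ks, d.contains k = false) :
    (ks.foldl (fun d k => d.insert k ([] : List (List (String × String)))) d).keys = d.keys ++ ks := by
  induction ks generalizing d with
  | nil => simp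
  | cons k ks ih =>
      simp only [List.foldl_cons]
      rw [ih (d.insert k []) hnd.of_cons, PySem.Dict.keys_insert_of_not_contains _ _ (hfresh k (by simp))]
      · simp
      · intro k' hk'
        rw [PySem.Dict.contains_insert]
        have : k' ≠ k := by
          intro h; exact (List.nodup_cons.mp hnd).1 (h ▸ hk')
        simp [this, hfresh k' (by simp [hk'])]

theorem getD_initFold (ks : List String)
    (d : PySem.Dict String (List (List (String × String))))
    (hd : ∀ k, d.getD k [] = []) (k : String) :
    (ks.foldl (fun d k => d.insert k ([] : List (List (String × String)))) d).getD k [] = [] := by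
  induction ks generalizing d with
  | nil => exact hd k
  | cons k' ks ih =>
      simp only [List.foldl_cons]
      exact ih _ (fun k'' => by rw [PySem.Dict.getD_insert]; split <;> simp [hd])

-- ===== stability of the insertion sort under filtering =====

theorem insertBy_all_before {α : Type} (before : α → α → Bool) (x : α) (l : List α)
    (h : ∀ z ∈ l, before x z = true) :
    PySem.List.insertBy before x l = x :: l := by
  cases l with
  | nil => rfl
  | cons y ys => simp [PySem.List.insertBy, h y (by simp)]

theorem filter_insertBy {α κ : Type} [LinearOrder κ] (key : α → κ) (p : α → Bool)
    (x : α) (l : List α) (hl : l.Pairwise (fun a b => key a ≤ key b)) :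
    (PySem.List.insertBy (fun a b => decide (key a < key b)) x l).filter p
      = if p x then PySem.List.insertBy (fun a b => decide (key a < key b)) x (l.filter p)
        else l.filter p := by
  induction l with
  | nil => by_cases hp : p x <;> simp [PySem.List.insertBy, hp]
  | cons y ys ih =>
      have hys := hl.of_cons
      have hyall := List.pairwise_cons.mp hl |>.1
      by_cases hb : key x < key y
      · -- x goes in front
        by_cases hp : p x
        · by_cases hpy : p y
          · simp [PySem.List.insertBy, hb, hp, hpy]
          · have hfront : PySem.List.insertBy (fun a b => decide (key a < key b)) x (List.filter p ys)
                = x :: List.filter p ys :=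
              insertBy_all_before _ _ _ (fun z hz => by
                simpa using lt_of_lt_of_le hb (hyall z (List.mem_of_mem_filter hz)))
            simp [PySem.List.insertBy, hb, hp, hpy, hfront]
        · simp [PySem.List.insertBy, hb, hp]
      · by_cases hp : p x
        · by_cases hpy : p y
          · simp [PySem.List.insertBy, hb, hp, hpy, ih hys]
          · simp [PySem.List.insertBy, hb, hp, hpy, ih hys]
        · by_cases hpy : p y
          · simp [PySem.List.insertBy, hb, hp, hpy, ih hys]
          · simp [PySem.List.insertBy, hb, hp, hpy, ih hys]

theorem pairwise_insertBy {α κ : Type} [LinearOrder κ] (key : α → κ)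
    (x : α) (l : List α) (hl : l.Pairwise (fun a b => key a ≤ key b)) :
    (PySem.List.insertBy (fun a b => decide (key a < key b)) x l).Pairwise
      (fun a b => key a ≤ key b) := by
  induction l with
  | nil => simp [PySem.List.insertBy]
  | cons y ys ih =>
      have hys := hl.of_cons
      have hyall := List.pairwise_cons.mp hl |>.1
      by_cases hb : key x < key y
      · have heq : PySem.List.insertBy (fun a b => decide (key a < key b)) x (y :: ys)
            = x :: y :: ys := by simp [PySem.List.insertBy, hb]
        rw [heq]
        refine List.pairwise_cons.mpr ⟨?_, hl⟩
        intro z hz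
        rcases List.mem_cons.mp hz with rfl | hz
        · exact le_of_lt hb
        · exact (le_of_lt hb).trans (hyall z hz)
      · have heq : PySem.List.insertBy (fun a b => decide (key a < key b)) x (y :: ys)
            = y :: PySem.List.insertBy (fun a b => decide (key a < key b)) x ys := by
          simp [PySem.List.insertBy, hb]
        rw [heq]
        refine List.pairwise_cons.mpr ⟨?_, ih hys⟩
        intro z hz
        rcases (PySem.List.mem_insertBy _ _ _ _).mp hz with rfl | hz
        · exact le_of_not_gt hb
        · exact hyall z hz

theorem filter_foldl_insertBy {α κ : Type} [LinearOrder κ] (key : α → κ) (p : α → Bool)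
    (l : List α) (acc : List α) (hacc : acc.Pairwise (fun a b => key a ≤ key b)) :
    (l.foldl (fun acc x => PySem.List.insertBy (fun a b => decide (key a < key b)) x acc) acc).filter p
      = (l.filter p).foldl (fun acc x => PySem.List.insertBy (fun a b => decide (key a < key b)) x acc) (acc.filter p) := by
  induction l generalizing acc with
  | nil => rfl
  | cons x l ih =>
      simp only [List.foldl_cons, List.filter_cons]
      rw [ih _ (pairwise_insertBy key x acc hacc), filter_insertBy key p x acc hacc]
      by_cases hp : p x <;> simp [hp]

theorem filter_sorted {α κ : Type} [LinearOrder κ] (key : α → κ) (p : α → Bool)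
    (xs : List α) :
    (PySem.List.sorted xs key false).filter p = PySem.List.sorted (xs.filter p) key false := by
  rw [PySem.List.sorted_eq_foldl_insertBy, PySem.List.sorted_eq_foldl_insertBy]
  simpa using filter_foldl_insertBy key p xs [] (by simp)

-- ===== VERDICT (by name: the statement is the Claim_ definition above) =====
theorem group_by_session_py_spec : Claim_equal_group_by_session_py := by
  intro observations _
  unfold Spec_group_by_session_py group_by_session_py group_by_session_py_alt
  have hnd := PySem.List.nodup_dedup (observations.map pvSessionKey)
  set ks := PySem.List.dedup (observations.map pvSessionKey) with hks
  set step := fun (d : PySem.Dict String (List (List (String × String)))) e =>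
    d.modify (pvSessionKey e) [] (fun l => l ++ [e]) with hstep
  -- the A-side grouping dict
  set GA := observations.foldl step PySem.Dict.empty with hGA
  have hkA : GA.keys = ks := by
    rw [hGA, hstep, keys_groupFold]
    simp [hks, PySem.List.dedup, PySem.Set.ofList, PySem.Set.empty, PySem.Dict.keys_empty]
  have hgA : ∀ k, GA.getD k [] = observations.filter (fun e => pvSessionKey e == k) := by
    intro k; rw [hGA, hstep, getD_groupFold]; simp
  -- the B-side initial dict
  set init := PySem.Dict.ofList (ks.map (fun k => (k, ([] : List (List (String × String))))))
    with hinit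
  have hinit_fold : init = ks.foldl (fun d k => d.insert k []) PySem.Dict.empty := by
    rw [hinit]; simp [PySem.Dict.ofList, PySem.Dict.update, List.foldl_map]
  have hkI : init.keys = ks := by
    rw [hinit_fold, keys_initFold ks _ hnd (by simp)]
    simp
  have hgI : ∀ k, init.getD k [] = [] := by
    intro k
    rw [hinit_fold]
    exact getD_initFold ks _ (fun k' => PySem.Dict.getD_empty k' []) k
  -- the B-side filled dict
  set GB := (PySem.List.sorted observations pvTsKey false).foldl step init with hGB
  have hkB : GB.keys = ks := by
    rw [hGB, hstep, keys_groupFold, hkI]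
    apply foldl_add_of_mem
    intro x hx
    rcases List.mem_map.mp hx with ⟨e, he, rfl⟩
    have : e ∈ observations := ((PySem.List.sorted_perm observations pvTsKey false).mem_iff).mp he
    exact (PySem.List.mem_dedup _ _).mpr (List.mem_map_of_mem this)
  have hgB : ∀ k, GB.getD k []
      = PySem.List.sorted (observations.filter (fun e => pvSessionKey e == k)) pvTsKey false := by
    intro k
    rw [hGB, hstep, getD_groupFold, hgI k, List.nil_append,
      filter_sorted pvTsKey (fun e => pvSessionKey e == k)]
  -- both items lists are ks.map of the same bucket function
  show GA.items.map (fun p => (p.1, PySem.List.sorted p.2 pvTsKey false)) = GB.items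
  rw [PySem.Dict.items_eq_map_keys GA (hkA ▸ hnd) ([] : List (List (String × String))),
      PySem.Dict.items_eq_map_keys GB (hkB ▸ hnd) ([] : List (List (String × String))),
      hkA, hkB, List.map_map]
  apply List.map_congr_left
  intro k _
  simp [hgA k, hgB k]
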